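-- pv_equiv track=rewrite | github.com/SalarKhosravi/Python-01 | session_20.py | myRange3
-- ===== SOURCE A (Python) =====
-- def myRange3(start=None, end=None, step=None):
--     # Handle cases where only one argument is provided (like range(stop))
--     if end is None:
--         if start is None:
--             raise ValueError("At least one argument must be provided")
--         end = start
--         start = 0
--
--     # Default step to 1 if not provided
--     if step is None:
--         step = 1
--
--     # Check if start, end, and step are integers
--     if not all(isinstance(arg, int) for arg in [start, end, step]):
--         return 'input must be integer'
--
--     # Check if step is zero
--     if step == 0:
--         raise ValueError("step argument must not be zero")
--
--     mylist = []
--     i = start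
--
--     # Generate the range
--     if step > 0:
--         while i < end:
--             mylist.append(i)
--             i += step
--     else:
--         while i > end:
--             mylist.append(i)
--             i += step
--
--     return mylist
-- ===== SOURCE B (Python) =====
-- def myRange3(start=None, end=None, step=None):
--     if end is None:
--         if start is None:
--             raise ValueError("At least one argument must be provided")
--         end = start
--         start = 0
--     if step is None:
--         step = 1
--     if not all(isinstance(arg, int) for arg in [start, end, step]):
--         return 'input must be integer'
--     if step == 0:
--         raise ValueError("step argument must not be zero")
--     sign = 1 if step > 0 else -1
--     n = max(0, (end - start + step - sign) // step)
--     return [start + i * step for i in range(n)]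
-- ===== Notes on version B (the rewrite author's own statement) =====
-- stated objective: alternative
-- what changed: Replaces the conditional while-loop generation with a closed-form element count n = max(0, (end-start+step-sign)//step) followed by direct index construction [start+i*step for i in range(n)].
-- outside the precondition, e.g. on myRange3(None, None, None): A raises ValueError, B raises ValueError; on myRange3(None, 5, None): A returns 'input must be integer', B returns 'input must be integer'; on myRange3(1, 5, 0): A raises ValueError, B raises ValueError
import Mathlib
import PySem

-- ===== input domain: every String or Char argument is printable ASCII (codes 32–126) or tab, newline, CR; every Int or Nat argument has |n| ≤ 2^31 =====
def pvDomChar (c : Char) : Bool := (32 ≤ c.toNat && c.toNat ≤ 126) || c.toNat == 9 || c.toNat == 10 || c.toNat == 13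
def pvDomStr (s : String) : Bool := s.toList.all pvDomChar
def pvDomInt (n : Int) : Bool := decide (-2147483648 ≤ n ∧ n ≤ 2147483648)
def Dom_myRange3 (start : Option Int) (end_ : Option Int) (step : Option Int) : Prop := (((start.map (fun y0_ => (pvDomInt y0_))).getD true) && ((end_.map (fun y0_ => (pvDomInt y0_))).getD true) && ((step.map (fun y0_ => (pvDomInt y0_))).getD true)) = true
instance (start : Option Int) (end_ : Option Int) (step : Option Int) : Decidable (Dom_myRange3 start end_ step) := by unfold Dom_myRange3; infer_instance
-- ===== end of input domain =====

-- B replaces A's conditional while-loop with a closed-form element count followed by index construction.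


-- ===== PORT A =====
-- the two while loops of A ('while i < end' for step>0, 'while i > end' otherwise);
-- step = 0 never reaches the loops (A raises there; excluded by Pre_)
def myRange3_go (end_ step i : Int) : List Int :=
  if h1 : 0 < step then
    if h2 : i < end_ then i :: myRange3_go end_ step (i + step) else []
  else if h3 : step < 0 then
    if h4 : end_ < i then i :: myRange3_go end_ step (i + step) else []
  else []
termination_by (if 0 < step then end_ - i else i - end_).toNat
decreasing_by
  · simp only [if_pos h1]; omega
  · simp only [if_neg h1]; omega

def myRange3 (start : Option Int) (end_ : Option Int) (step : Option Int) : List Int :=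
  match end_ with
  | none =>
    match start with
    | none => []  -- A raises ValueError here; excluded by Pre_
    | some s0 => myRange3_go s0 (step.getD 1) 0
  | some e =>
    match start with
    | none => []  -- A returns the string 'input must be integer' here; excluded by Pre_
    | some s => myRange3_go e (step.getD 1) s

-- ===== PORT B =====
def myRange3_altCore (s e st : Int) : List Int :=
  if st = 0 then []  -- B raises ValueError here; excluded by Pre_
  else
    let sign : Int := if 0 < st then 1 else -1
    let n : Int := max 0 (PySem.Int.floordiv (e - s + st - sign) st)
    (PySem.List.pyRange 0 n 1).map (fun i => s + i * st)

def myRange3_alt (start : Option Int) (end_ : Option Int) (step : Option Int) : List Int :=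
  match end_ with
  | none =>
    match start with
    | none => []  -- raises; excluded by Pre_
    | some s0 => myRange3_altCore 0 s0 (step.getD 1)
  | some e =>
    match start with
    | none => []  -- returns a string; excluded by Pre_
    | some s => myRange3_altCore s e (step.getD 1)

-- ===== PRECONDITION & SPEC =====
-- Pre_ excludes: start = None with end = None (A raises ValueError), start = None with an end
-- (A returns the string 'input must be integer', not a list), and step = 0 (A raises ValueError).
def Pre_myRange3 (start : Option Int) (end_ : Option Int) (step : Option Int) : Prop :=
  start ≠ none ∧ step ≠ some 0
instance (start : Option Int) (end_ : Option Int) (step : Option Int) : Decidable (Pre_myRange3 start end_ step) := by unfold Pre_myRange3; infer_instance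

def pvWitness_myRange3 : Option Int × Option Int × Option Int := (some 1, some 7, some 2)

def Spec_myRange3 (start : Option Int) (end_ : Option Int) (step : Option Int) (out : List Int) : Prop := out = myRange3_alt start end_ step
instance (start : Option Int) (end_ : Option Int) (step : Option Int) (out : List Int) : Decidable (Spec_myRange3 start end_ step out) := by unfold Spec_myRange3; infer_instance

-- ===== CLAIM (what is proved, stated in full; the proofs are below) =====
def Claim_equal_myRange3 : Prop := ∀ (start : Option Int) (end_ : Option Int) (step : Option Int), Dom_myRange3 start end_ step → Pre_myRange3 start end_ step → Spec_myRange3 start end_ step (myRange3 start end_ step)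

-- ===== LEMMAS AND PROOFS =====

-- count-based characterisation of the ascending loop
lemma go_pos (st : Int) (hst : 0 < st) : ∀ (n : Nat), ∀ (e i : Int),
    PySem.Int.floordiv (e - i + st - 1) st = (n : Int) →
    myRange3_go e st i = (List.range n).map (fun k : Nat => i + (k : Int) * st) := by
  intro n
  induction n with
  | zero =>
    intro e i h
    have hlt : e - i + st - 1 < 1 * st :=
      (PySem.Int.floordiv_lt_iff_lt_mul hst).mp (by omega)
    have hni : ¬ i < e := by nlinarith
    rw [myRange3_go]
    simp [hst, hni]
  | succ n ih =>
    intro e i h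
    have hlow : ((n : Int) + 1) * st ≤ e - i + st - 1 :=
      (PySem.Int.le_floordiv_iff_mul_le hst).mp (by omega)
    have hup : e - i + st - 1 < ((n : Int) + 1 + 1) * st :=
      (PySem.Int.floordiv_lt_iff_lt_mul hst).mp (by omega)
    have hn0 : (0 : Int) ≤ (n : Int) * st := mul_nonneg (by positivity) hst.le
    have hi : i < e := by nlinarith
    have hnext : PySem.Int.floordiv (e - (i + st) + st - 1) st = (n : Int) := by
      rw [PySem.Int.floordiv_eq_iff_of_pos hst]
      constructor <;> nlinarith
    rw [myRange3_go]
    simp only [dif_pos hst, dif_pos hi, ih e (i + st) hnext,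
      List.range_succ_eq_map, List.map_cons, List.map_map]
    congr 1
    · simp
    · apply List.map_congr_left
      intro k _
      simp [Function.comp, Nat.succ_eq_add_one]
      ring

-- count-based characterisation of the descending loop
lemma go_neg (st : Int) (hst : st < 0) : ∀ (n : Nat), ∀ (e i : Int),
    PySem.Int.floordiv (e - i + st + 1) st = (n : Int) →
    myRange3_go e st i = (List.range n).map (fun k : Nat => i + (k : Int) * st) := by
  have hpos : (0 : Int) < -st := by omega
  intro n
  induction n with
  | zero =>
    intro e i h
    have h' : PySem.Int.floordiv (-(e - i + st + 1)) (-st) = 0 := by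
      rw [PySem.Int.floordiv_neg_neg]; omega
    have hlt : -(e - i + st + 1) < 1 * (-st) :=
      (PySem.Int.floordiv_lt_iff_lt_mul hpos).mp (by omega)
    have hni : ¬ e < i := by nlinarith
    rw [myRange3_go]
    simp [hst, hni, not_lt_of_gt hst]
  | succ n ih =>
    intro e i h
    have h' : PySem.Int.floordiv (-(e - i + st + 1)) (-st) = (n : Int) + 1 := by
      rw [PySem.Int.floordiv_neg_neg]; omega
    have hlow : ((n : Int) + 1) * (-st) ≤ -(e - i + st + 1) :=
      (PySem.Int.le_floordiv_iff_mul_le hpos).mp (by omega)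
    have hup : -(e - i + st + 1) < ((n : Int) + 1 + 1) * (-st) :=
      (PySem.Int.floordiv_lt_iff_lt_mul hpos).mp (by omega)
    have hn0 : (0 : Int) ≤ (n : Int) * (-st) := mul_nonneg (by positivity) hpos.le
    have hi : e < i := by nlinarith
    have hnext : PySem.Int.floordiv (e - (i + st) + st + 1) st = (n : Int) := by
      have : PySem.Int.floordiv (-(e - (i + st) + st + 1)) (-st) = (n : Int) := by
        rw [PySem.Int.floordiv_eq_iff_of_pos hpos]
        constructor <;> nlinarith
      rw [PySem.Int.floordiv_neg_neg] at this; exact this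
    rw [myRange3_go]
    simp only [dif_neg (not_lt_of_gt hst), dif_pos hst, dif_pos hi, ih e (i + st) hnext,
      List.range_succ_eq_map, List.map_cons, List.map_map]
    congr 1
    · simp
    · apply List.map_congr_left
      intro k _
      simp [Function.comp, Nat.succ_eq_add_one]
      ring

-- the two ports' cores agree for every nonzero step
lemma core_eq (s e st : Int) (hst : st ≠ 0) : myRange3_go e st s = myRange3_altCore s e st := by
  unfold myRange3_altCore
  rw [if_neg hst]
  rcases lt_or_gt_of_ne hst with hneg | hpos
  · -- descending
    have hsg : ¬ (0 : Int) < st := by omega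
    simp only [if_neg hsg]
    have hrw : e - s + st - -1 = e - s + st + 1 := by ring
    rw [hrw, PySem.List.pyRange_one]
    set c : Int := PySem.Int.floordiv (e - s + st + 1) st with hc
    by_cases h0 : 0 ≤ c
    · have h1 : (max 0 c - 0).toNat = c.toNat := by omega
      rw [h1, List.map_map, go_neg st hneg c.toNat e s (by omega)]
      apply List.map_congr_left
      intro k _
      simp [Function.comp]
    · have h1 : (max 0 c - 0).toNat = 0 := by omega
      have h' : PySem.Int.floordiv (-(e - s + st + 1)) (-st) = c := by
        rw [PySem.Int.floordiv_neg_neg]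
      have hlt : -(e - s + st + 1) < 1 * (-st) :=
        (PySem.Int.floordiv_lt_iff_lt_mul (by omega)).mp (by omega)
      have hni : ¬ e < s := by nlinarith
      rw [h1, myRange3_go]
      simp [hsg, hneg, hni]
  · -- ascending
    simp only [if_pos hpos]
    rw [PySem.List.pyRange_one]
    set c : Int := PySem.Int.floordiv (e - s + st - 1) st with hc
    by_cases h0 : 0 ≤ c
    · have h1 : (max 0 c - 0).toNat = c.toNat := by omega
      rw [h1, List.map_map, go_pos st hpos c.toNat e s (by omega)]
      apply List.map_congr_left
      intro k _
      simp [Function.comp]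
    · have h1 : (max 0 c - 0).toNat = 0 := by omega
      have hlt : e - s + st - 1 < 1 * st :=
        (PySem.Int.floordiv_lt_iff_lt_mul hpos).mp (by omega)
      have hni : ¬ s < e := by nlinarith
      rw [h1, myRange3_go]
      simp [hpos, hni]

-- ===== VERDICT (by name: the statement is the Claim_ definition above) =====
theorem myRange3_spec : Claim_equal_myRange3 := by
  intro start end_ step _ hpre
  unfold Spec_myRange3 myRange3 myRange3_alt
  obtain ⟨hs, hst⟩ := hpre
  have hstep : step.getD 1 ≠ 0 := by cases step with
    | none => simp
    | some v => simp; intro h; exact hst (by simp [h])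
  cases end_ with
  | none => cases start with
    | none => simp
    | some s0 => exact core_eq 0 s0 _ hstep
  | some e => cases start with
    | none => exact absurd rfl hs
    | some s => exact core_eq s e _ hstep
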